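-- pv_equiv track=rewrite | github.com/ranjrana2012-lab/project-chimera | services/simulation-engine/agents/interaction.py | _generate_default_response
-- ===== SOURCE A (Python) =====
-- from typing import List, Dict, Any, Optional
--
-- def _generate_default_response(memories: List[Dict[str, Any]]) -> str:
--     """Generate default response."""
--     total = len(memories)
--     rounds = sorted(set(m["round"] for m in memories))
--
--     return (
--         f"During the simulation rounds {rounds[0] if rounds else 0} to "
--         f"{rounds[-1] if rounds else 0}, I recorded {total} actions. "
--         f"I processed information and arrived at positions through careful consideration."
--     )
-- ===== SOURCE B (Python) =====
-- def _generate_default_response(memories):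
--     """Generate default response."""
--     total = len(memories)
--     lo = min((m["round"] for m in memories), default=0)
--     hi = max((m["round"] for m in memories), default=0)
--     return (
--         f"During the simulation rounds {lo} to "
--         f"{hi}, I recorded {total} actions. "
--         f"I processed information and arrived at positions through careful consideration."
--     )
-- ===== Notes on version B (the rewrite author's own statement) =====
-- stated objective: simpler
-- what changed: Drops the sorted(set(...)) construction and index-the-ends step; the two extremes are computed directly with min/max (default=0), one pass each.
import Mathlib
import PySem

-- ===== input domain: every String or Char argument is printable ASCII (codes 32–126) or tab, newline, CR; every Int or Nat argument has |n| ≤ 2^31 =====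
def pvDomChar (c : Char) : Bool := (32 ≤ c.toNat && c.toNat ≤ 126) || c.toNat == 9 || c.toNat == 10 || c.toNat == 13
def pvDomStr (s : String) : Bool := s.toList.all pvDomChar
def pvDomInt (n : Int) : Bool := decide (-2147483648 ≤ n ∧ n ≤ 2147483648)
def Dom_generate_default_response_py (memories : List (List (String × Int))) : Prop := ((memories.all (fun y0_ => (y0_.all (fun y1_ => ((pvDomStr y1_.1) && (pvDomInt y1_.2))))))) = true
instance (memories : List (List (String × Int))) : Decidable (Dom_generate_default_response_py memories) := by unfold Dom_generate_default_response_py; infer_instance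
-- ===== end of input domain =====

-- B drops A's sorted(set(...))-then-index-the-ends construction and computes the two
-- extremes directly with min/max (default 0), one pass each; return values proved equal.

-- ===== PORT A =====
-- m["round"]: dict lookup; total via getD 0, exact under Pre_ (key present — else Python raises KeyError)
def pvRound (m : List (String × Int)) : Int := PySem.Dict.getD (PySem.Dict.ofList m) "round" 0

-- the f-string shared by both sources verbatim
def pvMsg (lo hi total : Int) : String :=
  "During the simulation rounds " ++ PySem.Int.toStr lo ++ " to " ++ PySem.Int.toStr hi ++
  ", I recorded " ++ PySem.Int.toStr total ++
  " actions. I processed information and arrived at positions through careful consideration."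

def generate_default_response_py (memories : List (List (String × Int))) : String :=
  let total := PySem.List.len memories
  let rounds := PySem.List.sorted (PySem.Set.ofList (memories.map pvRound)) (fun x => x) false
  pvMsg (if rounds.isEmpty then 0 else PySem.List.pyGetD rounds 0 0)
        (if rounds.isEmpty then 0 else PySem.List.pyGetD rounds (-1) 0)
        total

-- ===== PORT B =====
def generate_default_response_py_alt (memories : List (List (String × Int))) : String :=
  let total := PySem.List.len memories
  pvMsg (PySem.List.minD (memories.map pvRound) (fun x => x) 0)
        (PySem.List.maxD (memories.map pvRound) (fun x => x) 0)
        total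

-- ===== PRECONDITION & SPEC =====
-- Pre_ excludes exactly the memories lacking a "round" key, on which Python A raises KeyError.
def Pre_generate_default_response_py (memories : List (List (String × Int))) : Prop :=
  (memories.all (fun m => (PySem.Dict.ofList m).contains "round")) = true
instance (memories : List (List (String × Int))) : Decidable (Pre_generate_default_response_py memories) := by unfold Pre_generate_default_response_py; infer_instance
def pvWitness_generate_default_response_py : (List (List (String × Int))) := [[("round", 3)], [("round", 1)]]

def Spec_generate_default_response_py (memories : List (List (String × Int))) (out : String) : Prop := out = generate_default_response_py_alt memories
instance (memories : List (List (String × Int))) (out : String) : Decidable (Spec_generate_default_response_py memories out) := by unfold Spec_generate_default_response_py; infer_instance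

-- ===== CLAIM (what is proved, stated in full; the proofs are below) =====
def Claim_equal_generate_default_response_py : Prop := ∀ (memories : List (List (String × Int))), Dom_generate_default_response_py memories → Pre_generate_default_response_py memories → Spec_generate_default_response_py memories (generate_default_response_py memories)

-- ===== LEMMAS AND PROOFS =====

-- sorted(set(rs)) is nonempty when rs is
theorem pv_sorted_set_ne_nil (rs : List Int) (h : rs ≠ []) :
    PySem.List.sorted (PySem.Set.ofList rs) (fun x => x) false ≠ [] := by
  rw [Ne, PySem.List.sorted_eq_nil_iff]
  intro he
  obtain ⟨x, hx⟩ := List.exists_mem_of_ne_nil rs h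
  have : x ∈ PySem.Set.ofList rs := (PySem.Set.mem_ofList rs x).mpr hx
  simp [he] at this

-- sorted(set(rs))[0] is min(rs)
theorem pv_head_sorted_set (rs : List Int) (h : rs ≠ []) :
    PySem.List.pyGetD (PySem.List.sorted (PySem.Set.ofList rs) (fun x => x) false) 0 0 =
      PySem.List.minD rs (fun x => x) 0 := by
  obtain ⟨v, t, rfl⟩ := List.exists_cons_of_ne_nil h
  have hs := pv_sorted_set_ne_nil (v :: t) h
  obtain ⟨m, s, hms⟩ := List.exists_cons_of_ne_nil hs
  have hmn : PySem.List.min? (v :: t) (fun y => y) = some (t.foldl min v) :=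
    PySem.List.min?_id_cons v t
  have h1 : m ≤ t.foldl min v := by
    have := PySem.List.key_head_sorted_le (PySem.Set.ofList (v :: t)) (fun x => x) hms
    exact this _ ((PySem.Set.mem_ofList _ _).mpr (PySem.List.min?_mem hmn))
  have h2 : t.foldl min v ≤ m := by
    have hmem : m ∈ (v :: t) := by
      have : m ∈ PySem.List.sorted (PySem.Set.ofList (v :: t)) (fun x => x) false := by
        rw [hms]; exact List.mem_cons_self
      exact (PySem.Set.mem_ofList _ _).mp ((PySem.List.mem_sorted _ _ _ _).mp this)
    exact PySem.List.min?_isMin hmn m hmem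
  rw [hms, PySem.List.pyGetD_zero_cons, PySem.List.minD, hmn]
  exact le_antisymm h1 h2

-- sorted(set(rs))[-1] is max(rs)
theorem pv_last_sorted_set (rs : List Int) (h : rs ≠ []) :
    PySem.List.pyGetD (PySem.List.sorted (PySem.Set.ofList rs) (fun x => x) false) (-1) 0 =
      PySem.List.maxD rs (fun x => x) 0 := by
  obtain ⟨v, t, rfl⟩ := List.exists_cons_of_ne_nil h
  have hs := pv_sorted_set_ne_nil (v :: t) h
  set srt := PySem.List.sorted (PySem.Set.ofList (v :: t)) (fun x => x) false with hsrt
  have hmx : PySem.List.max? (v :: t) (fun y => y) = some (t.foldl max v) :=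
    PySem.List.max?_id_cons v t
  have hlast_mem : srt.getLast hs ∈ (v :: t) := by
    have : srt.getLast hs ∈ srt := List.getLast_mem hs
    exact (PySem.Set.mem_ofList _ _).mp ((PySem.List.mem_sorted _ _ _ _).mp this)
  have h1 : srt.getLast hs ≤ t.foldl max v := PySem.List.max?_isMax hmx _ hlast_mem
  have h2 : t.foldl max v ≤ srt.getLast hs := by
    have hmem : t.foldl max v ∈ srt := by
      rw [hsrt, PySem.List.mem_sorted, PySem.Set.mem_ofList]
      exact PySem.List.max?_mem hmx
    obtain ⟨p, hp, hpe⟩ := List.mem_iff_getElem.mp hmem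
    have hlen : srt.length - 1 < srt.length := by
      have : 0 < srt.length := List.length_pos_iff.mpr hs
      omega
    have hmono : srt[p]'hp ≤ srt[srt.length - 1]'hlen :=
      PySem.List.sorted_id_getElem_mono (PySem.Set.ofList (v :: t))
        (p := p) (q := srt.length - 1) (by omega) hlen
    rw [← hpe]
    calc srt[p] ≤ srt[srt.length - 1] := hmono
      _ = srt.getLast hs := (List.getLast_eq_getElem hs).symm
  rw [PySem.List.pyGetD_neg_one srt 0 hs, PySem.List.maxD, hmx]
  exact le_antisymm h1 h2

-- ===== VERDICT (by name: the statement is the Claim_ definition above) =====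
theorem generate_default_response_py_spec : Claim_equal_generate_default_response_py := by
  intro memories _ _
  unfold Spec_generate_default_response_py generate_default_response_py generate_default_response_py_alt
  rcases memories with _ | ⟨m, ms⟩
  · rfl
  · have hne : ((m :: ms).map pvRound) ≠ [] := by simp
    have hE : (PySem.List.sorted (PySem.Set.ofList ((m :: ms).map pvRound)) (fun x => x) false).isEmpty = false :=
      List.isEmpty_eq_false_iff.mpr (pv_sorted_set_ne_nil _ hne)
    simp only [hE, Bool.false_eq_true, if_false]
    rw [pv_head_sorted_set _ hne, pv_last_sorted_set _ hne]
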